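-- pv_equiv track=rewrite | github.com/KhourySpecialProjects/MNG_Inventory_System | src/cdk/python/inventory_handler.py | _compute_lv_for_group
-- ===== SOURCE A (Python) =====
-- from collections import defaultdict, deque
--
-- ITEM_ID_KEY = "itemId"
--
-- PARENT_KEY = "parent"
--
-- def _compute_lv_for_group(items_for_kit):
--     """
--     Build parent/child relationships just for this (endItemNiin, liin) group.
--     LV is assigned per root subtree:
--       root depth 0 => A, child depth 1 => B, etc.
--     Multiple roots in the same group each get their own A/B/C chain,
--     and they are all printed in the same table.
--     """
--     id_to_item = {}
--     children = defaultdict(list)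
--
--     for itm in items_for_kit:
--         iid = itm.get(ITEM_ID_KEY)
--         if iid:
--             id_to_item[iid] = itm
--
--     roots = []
--     for itm in items_for_kit:
--         iid = itm.get(ITEM_ID_KEY)
--         parent = itm.get(PARENT_KEY)
--         if not iid:
--             continue
--         if parent and parent in id_to_item:
--             children[parent].append(itm)
--         else:
--             roots.append(itm)
--
--     lv_by_id = {}
--     for root in roots:
--         rid = root.get(ITEM_ID_KEY)
--         if not rid:
--             continue
--         q = deque()
--         q.append((root, 0))
--         while q:
--             node, depth = q.popleft()
--             nid = node.get(ITEM_ID_KEY)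
--             if not nid:
--                 continue
--             lv_by_id[nid] = chr(ord("A") + depth) if depth < 26 else "Z+"
--             for c in children.get(nid, []):
--                 q.append((c, depth + 1))
--
--     return lv_by_id, roots, children
-- ===== SOURCE B (Python) =====
-- ITEM_ID_KEY = "itemId"
-- PARENT_KEY = "parent"
--
-- def _compute_lv_for_group(items_for_kit):
--     ids = {itm.get(ITEM_ID_KEY) for itm in items_for_kit if itm.get(ITEM_ID_KEY)}
--
--     def is_child(itm):
--         p = itm.get(PARENT_KEY)
--         return bool(p) and p in ids
--
--     roots = [itm for itm in items_for_kit
--              if itm.get(ITEM_ID_KEY) and not is_child(itm)]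
--
--     children = {}
--     for itm in items_for_kit:
--         if itm.get(ITEM_ID_KEY) and is_child(itm):
--             children.setdefault(itm.get(PARENT_KEY), []).append(itm)
--
--     def at_depth(node, k):
--         # the nodes of node's subtree that sit exactly k levels below it,
--         # left to right (= the order their subtrees appear in `children`)
--         if k == 0:
--             return [node]
--         out = []
--         for c in children.get(node.get(ITEM_ID_KEY), []):
--             out.extend(at_depth(c, k - 1))
--         return out
--
--     lv_by_id = {}
--     for root in roots:
--         depth = 0
--         layer = at_depth(root, 0)
--         while layer:
--             label = chr(ord("A") + depth) if depth < 26 else "Z+"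
--             for node in layer:
--                 lv_by_id[node.get(ITEM_ID_KEY)] = label
--             depth += 1
--             layer = at_depth(root, depth)
--
--     return lv_by_id, roots, children
-- ===== Notes on version B (the rewrite author's own statement) =====
-- stated objective: alternative
-- what changed: Replaces the per-root deque BFS with iterative-deepening DFS: a recursive at_depth(node,k) helper re-collects the nodes exactly k levels below the root for each depth in turn (no queue or frontier state), and the preprocessing uses a set of ids with a comprehension for roots and a setdefault loop for children instead of A's id_to_item dict and two-accumulator loop.
import Mathlib
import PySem

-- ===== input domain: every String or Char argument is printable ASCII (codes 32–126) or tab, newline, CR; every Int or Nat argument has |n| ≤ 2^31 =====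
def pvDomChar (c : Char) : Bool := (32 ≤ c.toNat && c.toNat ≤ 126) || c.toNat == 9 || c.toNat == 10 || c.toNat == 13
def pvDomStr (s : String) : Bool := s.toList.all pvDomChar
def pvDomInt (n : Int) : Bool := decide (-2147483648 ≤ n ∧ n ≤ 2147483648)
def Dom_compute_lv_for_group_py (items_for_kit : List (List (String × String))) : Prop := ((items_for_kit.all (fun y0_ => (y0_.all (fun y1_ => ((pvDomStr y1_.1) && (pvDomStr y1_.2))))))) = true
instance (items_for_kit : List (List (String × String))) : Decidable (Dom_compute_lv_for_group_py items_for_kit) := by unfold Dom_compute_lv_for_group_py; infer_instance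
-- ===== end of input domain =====

-- B replaces A's queue BFS by iterative-deepening DFS: a recursive helper re-collects, for each
-- target depth k, the nodes exactly k levels below the root, so no queue is kept
-- (alternative decomposition, not faster).

-- ===== PORT A =====
-- shared accessors: itm.get(key) on an item dict, Python truthiness of the result
def pvGet (itm : List (String × String)) (k : String) : Option String := (PySem.Dict.mk itm).get? k
def pvTruthy (o : Option String) : Bool := !((o.getD "") == "")
def pvTid (itm : List (String × String)) : String := (pvGet itm "itemId").getD ""
def pvPid (itm : List (String × String)) : String := (pvGet itm "parent").getD ""
-- chr(ord('A') + depth) if depth < 26 else 'Z+'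
def pvLabel (depth : Nat) : String := if depth < 26 then String.ofList [Char.ofNat (65 + depth)] else "Z+"

-- A: first loop — id_to_item
def pvIdToItem (items : List (List (String × String))) : PySem.Dict String (List (String × String)) :=
  items.foldl (fun d itm =>
    if pvTruthy (pvGet itm "itemId") then d.insert (pvTid itm) itm else d) PySem.Dict.empty

-- A: second loop — roots and children (defaultdict append = modify with default []) in one pass
def pvRootsChildrenA (items : List (List (String × String)))
    (idt : PySem.Dict String (List (String × String))) :
    List (List (String × String)) × PySem.Dict String (List (List (String × String))) :=
  items.foldl (fun s itm =>
    if pvTruthy (pvGet itm "itemId") then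
      if pvTruthy (pvGet itm "parent") && idt.contains (pvPid itm) then
        (s.1, s.2.modify (pvPid itm) [] (· ++ [itm]))
      else (s.1 ++ [itm], s.2)
    else s) ([], PySem.Dict.empty)

-- A: the deque BFS loop. Fuel only makes the loop total in Lean: on duplicate-id cycles the Python
-- loop runs forever (outside Pre_); inside Pre_ the fuel 2n+2 is never exhausted (proved below).
def pvBfsA (children : PySem.Dict String (List (List (String × String)))) :
    Nat → PySem.Dict String String → List ((List (String × String)) × Nat) → PySem.Dict String String
  | 0, lv, _ => lv
  | _ + 1, lv, [] => lv
  | f + 1, lv, (node, depth) :: rest =>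
    if pvTruthy (pvGet node "itemId") then
      pvBfsA children f (lv.insert (pvTid node) (pvLabel depth))
        (rest ++ (children.getD (pvTid node) []).map (fun c => (c, depth + 1)))
    else pvBfsA children f lv rest

def compute_lv_for_group_py (items_for_kit : List (List (String × String))) :
    (List (String × String)) × (List (List (String × String))) × (List (String × List (List (String × String)))) :=
  let idt := pvIdToItem items_for_kit
  let rc := pvRootsChildrenA items_for_kit idt
  let lv := rc.1.foldl (fun lv root =>
      if pvTruthy (pvGet root "itemId") then
        pvBfsA rc.2 (2 * items_for_kit.length + 2) lv [(root, 0)]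
      else lv) PySem.Dict.empty
  (lv.items, rc.1, rc.2.items)

-- ===== PORT B =====
-- ids = {itm.get('itemId') for itm in items if itm.get('itemId')}
def pvIds (items : List (List (String × String))) : PySem.Set String :=
  PySem.Set.ofList ((items.filter (fun itm => pvTruthy (pvGet itm "itemId"))).map pvTid)

def pvIsChild (ids : PySem.Set String) (itm : List (String × String)) : Bool :=
  pvTruthy (pvGet itm "parent") && PySem.Set.contains ids (pvPid itm)

def pvRootsB (items : List (List (String × String))) (ids : PySem.Set String) :
    List (List (String × String)) :=
  items.filter (fun itm => pvTruthy (pvGet itm "itemId") && !(pvIsChild ids itm))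

-- children.setdefault(p, []).append(itm)  =  modify p with default []
def pvChildrenB (items : List (List (String × String))) (ids : PySem.Set String) :
    PySem.Dict String (List (List (String × String))) :=
  items.foldl (fun d itm =>
    if pvTruthy (pvGet itm "itemId") && pvIsChild ids itm then
      d.modify (pvPid itm) [] (· ++ [itm])
    else d) PySem.Dict.empty

-- at_depth(node, k): B's recursive per-level DFS re-descent, structural recursion on k
def pvAtDepth (children : PySem.Dict String (List (List (String × String)))) :
    Nat → List (String × String) → List (List (String × String))
  | 0, node => [node]
  | k + 1, node => (children.getD (pvTid node) []).flatMap (fun c => pvAtDepth children k c)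

-- the while-layer loop; fuel n+1 only totalises it (never exhausted inside Pre_, proved below)
def pvIterB (children : PySem.Dict String (List (List (String × String))))
    (root : List (String × String)) :
    Nat → PySem.Dict String String → Nat → List (List (String × String)) → PySem.Dict String String
  | 0, lv, _, _ => lv
  | _ + 1, lv, _, [] => lv
  | f + 1, lv, depth, layer@(_ :: _) =>
    let lab := pvLabel depth
    let lv' := layer.foldl (fun lv node => lv.insert (pvTid node) lab) lv
    pvIterB children root f lv' (depth + 1) (pvAtDepth children (depth + 1) root)

def compute_lv_for_group_py_alt (items_for_kit : List (List (String × String))) :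
    (List (String × String)) × (List (List (String × String))) × (List (String × List (List (String × String)))) :=
  let ids := pvIds items_for_kit
  let roots := pvRootsB items_for_kit ids
  let children := pvChildrenB items_for_kit ids
  let lv := roots.foldl (fun lv root =>
      pvIterB children root (items_for_kit.length + 1) lv 0 (pvAtDepth children 0 root)) PySem.Dict.empty
  (lv.items, roots, children.items)

-- ===== PRECONDITION & SPEC =====
-- Pre_ excludes lists in which two items share the same non-empty itemId: on such lists A's BFS can
-- loop forever (e.g. an item whose parent is its own duplicated id), and where A does return B
-- returns the same value anyway.
def Pre_compute_lv_for_group_py (items_for_kit : List (List (String × String))) : Prop :=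
  ((items_for_kit.filter (fun itm => pvTruthy (pvGet itm "itemId"))).map pvTid).Nodup
instance (items_for_kit : List (List (String × String))) : Decidable (Pre_compute_lv_for_group_py items_for_kit) := by
  unfold Pre_compute_lv_for_group_py; infer_instance

def pvWitness_compute_lv_for_group_py : (List (List (String × String))) :=
  [[("itemId", "a")], [("itemId", "b"), ("parent", "a")]]

def Spec_compute_lv_for_group_py (items_for_kit : List (List (String × String)))
    (out : (List (String × String)) × (List (List (String × String))) × (List (String × List (List (String × String))))) : Prop :=
  out = compute_lv_for_group_py_alt items_for_kit
instance (items_for_kit : List (List (String × String)))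
    (out : (List (String × String)) × (List (List (String × String))) × (List (String × List (List (String × String))))) :
    Decidable (Spec_compute_lv_for_group_py items_for_kit out) := by
  unfold Spec_compute_lv_for_group_py; infer_instance

-- ===== CLAIM (what is proved, stated in full; the proofs are below) =====
def Claim_equal_compute_lv_for_group_py : Prop :=
  ∀ (items_for_kit : List (List (String × String))), Dom_compute_lv_for_group_py items_for_kit →
    Pre_compute_lv_for_group_py items_for_kit →
    Spec_compute_lv_for_group_py items_for_kit (compute_lv_for_group_py items_for_kit)

-- ===== LEMMAS AND PROOFS =====

-- proof-only definitions
def pvBase (items : List (List (String × String))) (ids : PySem.Set String) : List (List (String × String)) :=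
  items.filter (fun itm => pvTruthy (pvGet itm "itemId") && pvIsChild ids itm)

def pvKids (base : List (List (String × String))) (p : String) : List (List (String × String)) :=
  base.filter (fun itm => pvPid itm == p)

-- invariant of the traversal: fr = current layer, P = pool of not-yet-reached child items
def pvGood (base fr P : List (List (String × String))) : Prop :=
  (∀ x ∈ fr ++ P, pvTid x ≠ "") ∧ ((fr ++ P).map pvTid).Nodup ∧
    (∀ x ∈ fr ++ P, ∀ y ∈ pvKids base (pvTid x), y ∈ P)

theorem pvTruthy_iff (o : Option String) : pvTruthy o = true ↔ o.getD "" ≠ "" := by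
  simp [pvTruthy]

theorem contains_idToItem (items : List (List (String × String))) (p : String) :
    (pvIdToItem items).contains p = PySem.Set.contains (pvIds items) p := by
  unfold pvIdToItem pvIds
  rw [PySem.List.foldl_if_eq_foldl_filter (fun itm => pvTruthy (pvGet itm "itemId"))
        (fun d itm => d.insert (pvTid itm) itm) items PySem.Dict.empty]
  rw [PySem.Dict.contains_eq_decide_mem_keys,
      PySem.Dict.keys_foldl_insert_key (key := pvTid) (f := fun _ itm => itm)]
  simp [PySem.Set.contains, PySem.Set.ofList_eq_foldl, PySem.Set.update]

theorem rootsChildrenA_eq (items : List (List (String × String))) :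
    pvRootsChildrenA items (pvIdToItem items) =
      (pvRootsB items (pvIds items), pvChildrenB items (pvIds items)) := by
  unfold pvRootsChildrenA pvRootsB pvChildrenB
  rw [PySem.List.foldl_congr_mem
    (l := items) (init := (([], PySem.Dict.empty) : List (List (String × String)) × PySem.Dict String (List (List (String × String)))))
    (f := fun s itm =>
      if pvTruthy (pvGet itm "itemId") then
        if pvTruthy (pvGet itm "parent") && (pvIdToItem items).contains (pvPid itm) then
          (s.1, s.2.modify (pvPid itm) [] (· ++ [itm]))
        else (s.1 ++ [itm], s.2)
      else s)
    (g := fun (s : List (List (String × String)) × PySem.Dict String (List (List (String × String)))) itm =>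
      ((fun (r : List (List (String × String))) itm =>
          if pvTruthy (pvGet itm "itemId") && !(pvIsChild (pvIds items) itm) then r ++ [itm] else r) s.1 itm,
       (fun (c : PySem.Dict String (List (List (String × String)))) itm =>
          if pvTruthy (pvGet itm "itemId") && pvIsChild (pvIds items) itm then
            c.modify (pvPid itm) [] (· ++ [itm]) else c) s.2 itm))
    (by
      intro acc x hx
      simp only [pvIsChild, ← contains_idToItem]
      cases h1 : pvTruthy (pvGet x "itemId") <;>
        cases h2 : pvTruthy (pvGet x "parent") && (pvIdToItem items).contains (pvPid x) <;>
          simp_all)]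
  rw [PySem.List.foldl_prod_mk
    (f := fun (r : List (List (String × String))) itm =>
      if pvTruthy (pvGet itm "itemId") && !(pvIsChild (pvIds items) itm) then r ++ [itm] else r)
    (g := fun (c : PySem.Dict String (List (List (String × String)))) itm =>
      if pvTruthy (pvGet itm "itemId") && pvIsChild (pvIds items) itm then
        c.modify (pvPid itm) [] (· ++ [itm]) else c)]
  rw [PySem.List.foldl_append_if_eq_filter]
  simp

theorem kids_eq (items : List (List (String × String))) (ids : PySem.Set String) (p : String) :
    (pvChildrenB items ids).getD p [] = pvKids (pvBase items ids) p := by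
  unfold pvChildrenB pvKids pvBase
  rw [PySem.List.foldl_if_eq_foldl_filter (fun itm => pvTruthy (pvGet itm "itemId") && pvIsChild ids itm)
        (fun (d : PySem.Dict String (List (List (String × String)))) itm => d.modify (pvPid itm) [] (· ++ [itm])) items PySem.Dict.empty]
  rw [show (List.foldl (fun d itm => PySem.Dict.modify d (pvPid itm) [] (· ++ [itm])) PySem.Dict.empty
        (List.filter (fun itm => pvTruthy (pvGet itm "itemId") && pvIsChild ids itm) items))
      = (List.foldl (fun d q => PySem.Dict.modify d q.1 [] (· ++ [q.2])) PySem.Dict.empty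
         ((List.filter (fun itm => pvTruthy (pvGet itm "itemId") && pvIsChild ids itm) items).map
            (fun itm => (pvPid itm, itm)))) from by rw [List.foldl_map]]
  rw [PySem.Dict.getD_foldl_modify_append]
  simp [List.filter_map, Function.comp_def]

-- one level of A's deque loop, folded into label inserts plus the next layer
theorem pvCur (cd : PySem.Dict String (List (List (String × String))))
    (base : List (List (String × String)))
    (hK : ∀ p, cd.getD p [] = pvKids base p) :
    ∀ (cur nxt : List (List (String × String))) (fA : Nat) (lv : PySem.Dict String String) (d : Nat),
      (∀ x ∈ cur, pvTid x ≠ "") → cur.length ≤ fA →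
      pvBfsA cd fA lv (cur.map (·, d) ++ nxt.map (·, d + 1)) =
        pvBfsA cd (fA - cur.length)
          (cur.foldl (fun lv n => lv.insert (pvTid n) (pvLabel d)) lv)
          ((nxt ++ cur.flatMap (fun n => pvKids base (pvTid n))).map (·, d + 1)) := by
  intro cur
  induction cur with
  | nil => intro nxt fA lv d _ _; simp
  | cons n rest ih =>
    intro nxt fA lv d htr hf
    match fA, hf with
    | f + 1, hf =>
      have hn : pvTruthy (pvGet n "itemId") = true := by
        rw [pvTruthy_iff]; exact htr n (List.mem_cons_self ..)
      simp only [List.map_cons, List.cons_append, pvBfsA, hn, if_pos]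
      rw [show rest.map (·, d) ++ nxt.map (·, d + 1) ++ (cd.getD (pvTid n) []).map (fun c => (c, d + 1))
            = rest.map (·, d) ++ (nxt ++ pvKids base (pvTid n)).map (·, d + 1) from by
        simp [hK, List.append_assoc]]
      rw [ih (nxt ++ pvKids base (pvTid n)) f _ d
            (fun x hx => htr x (List.mem_cons_of_mem _ hx)) (by simpa using hf)]
      simp [List.append_assoc]

theorem mem_pvKids {base : List (List (String × String))} {p : String} {y : List (String × String)} :
    y ∈ pvKids base p ↔ y ∈ base ∧ pvPid y = p := by
  simp [pvKids]

-- layer k+1 of B's re-descent is layer k expanded by the children map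
theorem pvAtDepth_succ (cd : PySem.Dict String (List (List (String × String)))) :
    ∀ (k : Nat) (n : List (String × String)),
      pvAtDepth cd (k + 1) n = (pvAtDepth cd k n).flatMap (fun m => cd.getD (pvTid m) []) := by
  intro k
  induction k with
  | zero => intro n; simp [pvAtDepth]
  | succ k ih =>
    intro n
    show (cd.getD (pvTid n) []).flatMap (fun c => pvAtDepth cd (k + 1) c) = _
    calc (cd.getD (pvTid n) []).flatMap (fun c => pvAtDepth cd (k + 1) c)
        = (cd.getD (pvTid n) []).flatMap
            (fun c => (pvAtDepth cd k c).flatMap (fun m => cd.getD (pvTid m) [])) := by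
          exact List.flatMap_congr (fun c _ => ih c)
      _ = ((cd.getD (pvTid n) []).flatMap (fun c => pvAtDepth cd k c)).flatMap
            (fun m => cd.getD (pvTid m) []) := by
          rw [List.flatMap_assoc]
      _ = _ := rfl

-- expanding the layer keeps the invariant, and splits the pool's length
theorem pvGoodStep (base : List (List (String × String)))
    (hbn : (base.map pvTid).Nodup)
    (fr P : List (List (String × String))) (hG : pvGood base fr P) :
    pvGood base (fr.flatMap (fun n => pvKids base (pvTid n)))
        (P.filter (fun x => !decide (x ∈ fr.flatMap (fun n => pvKids base (pvTid n))))) ∧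
      P.length = (fr.flatMap (fun n => pvKids base (pvTid n))).length +
        (P.filter (fun x => !decide (x ∈ fr.flatMap (fun n => pvKids base (pvTid n))))).length := by
  obtain ⟨hA, hB, hC⟩ := hG
  set fr' := fr.flatMap (fun n => pvKids base (pvTid n)) with hfr'
  set P' := P.filter (fun x => !decide (x ∈ fr')) with hP'
  have hfrP : ∀ y ∈ fr', y ∈ P := by
    intro y hy
    rw [hfr', List.mem_flatMap] at hy
    obtain ⟨x, hx, hyk⟩ := hy
    exact hC x (List.mem_append_left _ hx) y hyk
  have hPnodupmap : (P.map pvTid).Nodup := by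
    rw [List.map_append] at hB; exact hB.of_append_right
  have hPnodup : P.Nodup := hPnodupmap.of_map
  have hfrtid : (fr.map pvTid).Nodup := by
    rw [List.map_append] at hB; exact hB.of_append_left
  have hfr'nodup : fr'.Nodup := by
    rw [hfr', List.nodup_flatMap]
    constructor
    · intro x _; exact (hbn.of_map).filter _
    · have := (List.pairwise_map.mp hfrtid)
      refine this.imp ?_
      intro a b hab y hya hyb
      rw [mem_pvKids] at hya hyb
      exact hab (hya.2 ▸ hyb.2)
  have hperm : (fr' ++ P').Perm P := by
    have h1 : (P.filter (fun x => decide (x ∈ fr'))).Perm fr' := by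
      rw [List.perm_ext_iff_of_nodup (hPnodup.filter _) hfr'nodup]
      intro a
      simp only [List.mem_filter, decide_eq_true_eq]
      exact ⟨fun h => h.2, fun h => ⟨hfrP a h, h⟩⟩
    exact (h1.symm.append_right P').trans (List.filter_append_perm _ P)
  have hmemP : ∀ x ∈ fr' ++ P', x ∈ P := by
    intro x hx
    rcases List.mem_append.mp hx with h | h
    · exact hfrP x h
    · exact (List.mem_filter.mp h).1
  refine ⟨⟨?_, ?_, ?_⟩, ?_⟩
  · intro x hx; exact hA x (List.mem_append_right _ (hmemP x hx))
  · have := hperm.map pvTid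
    exact (this.nodup_iff).mpr hPnodupmap
  · intro x hx y hy
    have hyP : y ∈ P := hC x (List.mem_append_right _ (hmemP x hx)) y hy
    rw [hP', List.mem_filter]
    refine ⟨hyP, ?_⟩
    simp only [Bool.not_eq_eq_eq_not, Bool.not_true, decide_eq_false_iff_not]
    intro hyfr'
    rw [hfr', List.mem_flatMap] at hyfr'
    obtain ⟨z, hz, hyk⟩ := hyfr'
    have h1 : pvPid y = pvTid x := (mem_pvKids.mp hy).2
    have h2 : pvPid y = pvTid z := (mem_pvKids.mp hyk).2
    have : pvTid z ∈ fr.map pvTid := List.mem_map_of_mem hz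
    have hx' : pvTid x ∈ P.map pvTid := List.mem_map_of_mem (hmemP x hx)
    have hdisj := List.disjoint_of_nodup_append (by rw [← List.map_append]; exact hB)
    exact hdisj this (by rw [← h2, h1] at *; exact hx')
  · have := hperm.length_eq
    rw [List.length_append] at this; omega

-- A's deque BFS equals B's iterative-deepening loop, given the invariant and enough fuel
theorem pvLevAux (cd : PySem.Dict String (List (List (String × String))))
    (base : List (List (String × String)))
    (hK : ∀ p, cd.getD p [] = pvKids base p)
    (hbn : (base.map pvTid).Nodup) :
    ∀ (N : Nat) (P fr : List (List (String × String))) (root : List (String × String))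
      (fA fB : Nat) (lv : PySem.Dict String String) (d : Nat),
      P.length ≤ N → pvGood base fr P →
      fr.length + 2 * P.length + 1 ≤ fA → P.length + 1 ≤ fB →
      pvAtDepth cd d root = fr →
      pvBfsA cd fA lv (fr.map (·, d)) = pvIterB cd root fB lv d fr := by
  intro N
  induction N with
  | zero =>
    intro P fr root fA fB lv d hPN hG hfA hfB hfr
    match fr with
    | [] => cases fA <;> cases fB <;> simp [pvBfsA, pvIterB]
    | h :: t =>
      match fB, hfB with
      | g + 1, hfB =>
        set fr0 := h :: t with hfr0
        have htr : ∀ x ∈ fr0, pvTid x ≠ "" := fun x hx => hG.1 x (List.mem_append_left _ hx)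
        have hstep : pvAtDepth cd (d + 1) root = fr0.flatMap (fun n => pvKids base (pvTid n)) := by
          rw [pvAtDepth_succ, hfr]
          exact List.flatMap_congr (fun n _ => hK (pvTid n))
        rw [show pvIterB cd root (g + 1) lv d fr0
              = pvIterB cd root g
                  (fr0.foldl (fun lv n => lv.insert (pvTid n) (pvLabel d)) lv)
                  (d + 1) (pvAtDepth cd (d + 1) root) from by
          simp only [hfr0, pvIterB]]
        have hcur := pvCur cd base hK fr0 [] fA lv d htr (by omega)
        simp only [List.map_nil, List.nil_append, List.append_nil] at hcur
        rw [hcur, hstep]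
        obtain ⟨hG', hlen⟩ := pvGoodStep base hbn fr0 P hG
        by_cases hfr' : fr0.flatMap (fun n => pvKids base (pvTid n)) = []
        · rw [hfr']
          cases hg : g <;> cases hfa : fA - fr0.length <;> simp [pvBfsA, pvIterB]
        · have hlen' : (fr0.flatMap (fun n => pvKids base (pvTid n))).length ≥ 1 := by
            cases hx : fr0.flatMap (fun n => pvKids base (pvTid n)) with
            | nil => exact absurd hx hfr'
            | cons a l => simp
          exact absurd hlen (by omega)
  | succ N ih =>
    intro P fr root fA fB lv d hPN hG hfA hfB hfr
    match fr with
    | [] => cases fA <;> cases fB <;> simp [pvBfsA, pvIterB]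
    | h :: t =>
      match fB, hfB with
      | g + 1, hfB =>
        set fr0 := h :: t with hfr0
        have htr : ∀ x ∈ fr0, pvTid x ≠ "" := fun x hx => hG.1 x (List.mem_append_left _ hx)
        have hstep : pvAtDepth cd (d + 1) root = fr0.flatMap (fun n => pvKids base (pvTid n)) := by
          rw [pvAtDepth_succ, hfr]
          exact List.flatMap_congr (fun n _ => hK (pvTid n))
        rw [show pvIterB cd root (g + 1) lv d fr0
              = pvIterB cd root g
                  (fr0.foldl (fun lv n => lv.insert (pvTid n) (pvLabel d)) lv)
                  (d + 1) (pvAtDepth cd (d + 1) root) from by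
          simp only [hfr0, pvIterB]]
        have hcur := pvCur cd base hK fr0 [] fA lv d htr (by omega)
        simp only [List.map_nil, List.nil_append, List.append_nil] at hcur
        rw [hcur, hstep]
        obtain ⟨hG', hlen⟩ := pvGoodStep base hbn fr0 P hG
        by_cases hfr' : fr0.flatMap (fun n => pvKids base (pvTid n)) = []
        · rw [hfr']
          cases hg : g <;> cases hfa : fA - fr0.length <;> simp [pvBfsA, pvIterB]
        · have hlen' : (fr0.flatMap (fun n => pvKids base (pvTid n))).length ≥ 1 := by
            cases hx : fr0.flatMap (fun n => pvKids base (pvTid n)) with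
            | nil => exact absurd hx hfr'
            | cons a l => simp
          exact ih _ _ root (fA - fr0.length) g
            (fr0.foldl (fun lv n => lv.insert (pvTid n) (pvLabel d)) lv) (d + 1)
            (by omega) hG' (by omega) (by omega) hstep

theorem base_eq_filter_filter (items : List (List (String × String))) (ids : PySem.Set String) :
    pvBase items ids = (items.filter (fun itm => pvTruthy (pvGet itm "itemId"))).filter (pvIsChild ids) := by
  unfold pvBase
  rw [List.filter_filter]
  exact List.filter_congr (fun itm _ => by rw [Bool.and_comm])

theorem base_map_nodup (items : List (List (String × String)))
    (hpre : Pre_compute_lv_for_group_py items) :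
    ((pvBase items (pvIds items)).map pvTid).Nodup := by
  rw [base_eq_filter_filter]
  exact List.Nodup.sublist (List.Sublist.map pvTid List.filter_sublist) hpre

theorem root_good (items : List (List (String × String)))
    (hpre : Pre_compute_lv_for_group_py items)
    (root : List (String × String)) (hr : root ∈ pvRootsB items (pvIds items)) :
    pvGood (pvBase items (pvIds items)) [root] (pvBase items (pvIds items)) := by
  obtain ⟨hrmem, hrp⟩ := List.mem_filter.mp hr
  rw [Bool.and_eq_true] at hrp
  have hroott : pvTid root ≠ "" := (pvTruthy_iff _).mp hrp.1
  have hbaset : ∀ x ∈ pvBase items (pvIds items), pvTid x ≠ "" := by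
    intro x hx
    obtain ⟨_, hxp⟩ := List.mem_filter.mp hx
    rw [Bool.and_eq_true] at hxp
    exact (pvTruthy_iff _).mp hxp.1
  refine ⟨?_, ?_, ?_⟩
  · intro x hx
    rcases List.mem_append.mp hx with h | h
    · rw [List.mem_singleton] at h; exact h ▸ hroott
    · exact hbaset x h
  · simp only [List.singleton_append, List.map_cons, List.nodup_cons]
    refine ⟨?_, base_map_nodup items hpre⟩
    intro hmem
    rw [List.mem_map] at hmem
    obtain ⟨y, hy, hty⟩ := hmem
    have hinj := List.inj_on_of_nodup_map hpre
    rw [base_eq_filter_filter] at hy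
    obtain ⟨hy1, hy2⟩ := List.mem_filter.mp hy
    have hrf : root ∈ items.filter (fun itm => pvTruthy (pvGet itm "itemId")) :=
      List.mem_filter.mpr ⟨hrmem, hrp.1⟩
    have : y = root := hinj hy1 hrf hty
    subst this
    rw [hy2] at hrp
    simp at hrp
  · intro x _ y hy
    exact List.mem_of_mem_filter hy

-- ===== VERDICT (by name: the statement is the Claim_ definition above) =====
theorem compute_lv_for_group_py_spec : Claim_equal_compute_lv_for_group_py := by
  intro items _ hpre
  unfold Spec_compute_lv_for_group_py compute_lv_for_group_py compute_lv_for_group_py_alt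
  simp only [rootsChildrenA_eq]
  have hmain :
      (pvRootsB items (pvIds items)).foldl (fun lv root =>
        if pvTruthy (pvGet root "itemId") then
          pvBfsA (pvChildrenB items (pvIds items)) (2 * items.length + 2) lv [(root, 0)]
        else lv) PySem.Dict.empty
      = (pvRootsB items (pvIds items)).foldl (fun lv root =>
          pvIterB (pvChildrenB items (pvIds items)) root (items.length + 1) lv 0
            (pvAtDepth (pvChildrenB items (pvIds items)) 0 root)) PySem.Dict.empty := by
    refine PySem.List.foldl_congr_mem _ _ _ _ ?_
    intro lv root hr
    obtain ⟨hrmem, hrp⟩ := List.mem_filter.mp hr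
    rw [Bool.and_eq_true] at hrp
    rw [if_pos hrp.1]
    have hbl : (pvBase items (pvIds items)).length ≤ items.length := by
      have := List.length_filter_le
        (fun itm => pvTruthy (pvGet itm "itemId") && pvIsChild (pvIds items) itm) items
      simpa [pvBase] using this
    have := pvLevAux (pvChildrenB items (pvIds items)) (pvBase items (pvIds items))
      (kids_eq items (pvIds items)) (base_map_nodup items hpre)
      (pvBase items (pvIds items)).length (pvBase items (pvIds items)) [root] root
      (2 * items.length + 2) (items.length + 1) lv 0 (le_refl _)
      (root_good items hpre root hr) (by simp; omega) (by omega) (by simp [pvAtDepth])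
    simpa using this
  rw [hmain]
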